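-- pv_equiv track=rewrite | github.com/gsjz/knotodo | core/storage.py | _backfill_event_links
-- ===== SOURCE A (Python) =====
-- from collections import defaultdict
--
-- def _backfill_event_links(todos: list[dict], events: list[dict]) -> tuple[list[dict], bool]:
--     precise_candidates: dict[tuple[str, str, str, str], list[str]] = defaultdict(list)
--     fallback_candidates: dict[tuple[str, str, str], list[str]] = defaultdict(list)
--
--     for todo in todos:
--         due_time = todo.get("due_time") or ""
--         if not due_time:
--             continue
--         precise_candidates[(todo["date"], todo["title"], due_time, todo["notes"])].append(todo["id"])
--         fallback_candidates[(todo["date"], todo["title"], due_time)].append(todo["id"])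
--
--     used_todo_ids = {str(item.get("source_todo_id") or "").strip() for item in events if item.get("source_todo_id")}
--     next_events: list[dict] = []
--     changed = False
--
--     for event in events:
--         if (
--             event.get("event_type") in {"floating", "recurring"}
--             or not event.get("date")
--             or event.get("source_todo_id")
--             or not event.get("start_time")
--         ):
--             next_events.append(event)
--             continue
--
--         precise_key = (event["date"], event["title"], event["start_time"], event["notes"])
--         fallback_key = (event["date"], event["title"], event["start_time"])
--
--         precise_matches = [item for item in precise_candidates.get(precise_key, []) if item not in used_todo_ids]
--         fallback_matches = [item for item in fallback_candidates.get(fallback_key, []) if item not in used_todo_ids]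
--
--         linked_todo_id = ""
--         if len(precise_matches) == 1:
--             linked_todo_id = precise_matches[0]
--         elif len(fallback_matches) == 1:
--             linked_todo_id = fallback_matches[0]
--
--         if not linked_todo_id:
--             next_events.append(event)
--             continue
--
--         used_todo_ids.add(linked_todo_id)
--         next_events.append({**event, "source_todo_id": linked_todo_id})
--         changed = True
--
--     return next_events, changed
-- ===== SOURCE B (Python) =====
-- def _backfill_event_links(todos: list[dict], events: list[dict]) -> tuple[list[dict], bool]:
--     # Flat candidate-record list instead of keyed candidate dicts + a used-id set:
--     # each linkable todo becomes one (precise_key, id) record; matches are found by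
--     # scanning that list and a linked id is simply dropped from it.
--     cands = [((t["date"], t["title"], t.get("due_time") or "", t["notes"]), t["id"])
--              for t in todos if (t.get("due_time") or "")]
--     used0 = {str(e.get("source_todo_id") or "").strip() for e in events if e.get("source_todo_id")}
--     cands = [c for c in cands if c[1] not in used0]
--
--     out: list[dict] = []
--     changed = False
--     for event in events:
--         if (event.get("event_type") in {"floating", "recurring"}
--                 or not event.get("date")
--                 or event.get("source_todo_id")
--                 or not event.get("start_time")):
--             out.append(event)
--             continue
--         pk = (event["date"], event["title"], event["start_time"], event["notes"])
--         pm = [tid for key, tid in cands if key == pk]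
--         fm = [tid for key, tid in cands if key[:3] == pk[:3]]
--         linked = pm[0] if len(pm) == 1 else (fm[0] if len(fm) == 1 else "")
--         if not linked:
--             out.append(event)
--             continue
--         cands = [c for c in cands if c[1] != linked]
--         out.append({**event, "source_todo_id": linked})
--         changed = True
--     return out, changed
-- ===== Notes on version B (the rewrite author's own statement) =====
-- stated objective: simpler
-- what changed: B replaces A's two keyed candidate dicts plus an ever-growing used-id set (re-filtered on every lookup) by one flat list of (precise_key, id) candidate records that is scanned per event and from which a linked id is simply dropped, so no dict grouping or used-set bookkeeping exists at all.
import Mathlib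
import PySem

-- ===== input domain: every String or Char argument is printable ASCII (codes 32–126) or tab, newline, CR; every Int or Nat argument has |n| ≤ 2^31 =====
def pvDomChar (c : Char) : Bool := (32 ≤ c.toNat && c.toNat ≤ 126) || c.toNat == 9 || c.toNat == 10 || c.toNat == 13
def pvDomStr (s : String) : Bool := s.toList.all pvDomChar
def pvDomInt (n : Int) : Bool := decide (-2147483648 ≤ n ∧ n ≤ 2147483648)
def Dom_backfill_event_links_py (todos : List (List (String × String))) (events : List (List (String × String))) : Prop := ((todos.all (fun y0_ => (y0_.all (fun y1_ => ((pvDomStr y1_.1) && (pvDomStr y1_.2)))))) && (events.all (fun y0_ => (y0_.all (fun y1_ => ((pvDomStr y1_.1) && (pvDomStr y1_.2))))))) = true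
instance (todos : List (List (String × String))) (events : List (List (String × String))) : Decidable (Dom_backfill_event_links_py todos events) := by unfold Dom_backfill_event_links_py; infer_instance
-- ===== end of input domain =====

-- B drops A's keyed candidate dicts and used-id set in favour of one flat list of
-- (precise_key, id) candidate records scanned per event, from which a linked id is
-- removed (objective: simpler; equal return values, no mutation).

-- ===== PORT A =====
-- A-side helpers: the loop bodies of A as named step functions (literal transliterations).
def aBuildStep (st : PySem.Dict (String × String × String × String) (List String) × PySem.Dict (String × String × String) (List String)) (todo : List (String × String)) : PySem.Dict (String × String × String × String) (List String) × PySem.Dict (String × String × String) (List String) :=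
  let due := ((PySem.Dict.mk todo).get? "due_time").getD ""
  if due = "" then st
  else
    let date := ((PySem.Dict.mk todo).get? "date").getD ""
    let title := ((PySem.Dict.mk todo).get? "title").getD ""
    let notes := ((PySem.Dict.mk todo).get? "notes").getD ""
    let tid := ((PySem.Dict.mk todo).get? "id").getD ""
    (st.1.modify (date, title, due, notes) [] (fun l => l ++ [tid]),
     st.2.modify (date, title, due) [] (fun l => l ++ [tid]))

def initialUsed (events : List (List (String × String))) : PySem.Set String :=
  PySem.Set.ofList (events.filterMap (fun item =>
    match (PySem.Dict.mk item).get? "source_todo_id" with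
    | some s => if s = "" then none else some (PySem.Str.strip s)
    | none => none))

def skipEvent (event : List (String × String)) : Bool :=
  let et := (PySem.Dict.mk event).get? "event_type"
  (et == some "floating") || (et == some "recurring") ||
  (((PySem.Dict.mk event).get? "date").getD "" == "") ||
  (((PySem.Dict.mk event).get? "source_todo_id").getD "" != "") ||
  (((PySem.Dict.mk event).get? "start_time").getD "" == "")

def aEventStep (precise : PySem.Dict (String × String × String × String) (List String)) (fallback : PySem.Dict (String × String × String) (List String)) (st : PySem.Set String × List (List (String × String)) × Bool) (event : List (String × String)) : PySem.Set String × List (List (String × String)) × Bool :=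
  if skipEvent event then (st.1, st.2.1 ++ [event], st.2.2)
  else
    let date := ((PySem.Dict.mk event).get? "date").getD ""
    let title := ((PySem.Dict.mk event).get? "title").getD ""
    let start := ((PySem.Dict.mk event).get? "start_time").getD ""
    let notes := ((PySem.Dict.mk event).get? "notes").getD ""
    let pm := (precise.getD (date, title, start, notes) []).filter (fun i => !(PySem.Set.contains st.1 i))
    let fm := (fallback.getD (date, title, start) []).filter (fun i => !(PySem.Set.contains st.1 i))
    let linked := if pm.length = 1 then pm.headD "" else if fm.length = 1 then fm.headD "" else ""
    if linked = "" then (st.1, st.2.1 ++ [event], st.2.2)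
    else (PySem.Set.add st.1 linked,
          st.2.1 ++ [((PySem.Dict.mk event).insert "source_todo_id" linked).items], true)

def backfill_event_links_py (todos : List (List (String × String))) (events : List (List (String × String))) : (List (List (String × String))) × Bool :=
  let built := todos.foldl aBuildStep (PySem.Dict.empty, PySem.Dict.empty)
  let fin := events.foldl (aEventStep built.1 built.2) (initialUsed events, [], false)
  (fin.2.1, fin.2.2)

-- ===== PORT B =====
-- B-side helpers: a candidate record per linkable todo, the first three key fields, and
-- the event loop as structural recursion over (cands, out, changed).
def bCand (todo : List (String × String)) : Option ((String × String × String × String) × String) :=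
  let due := ((PySem.Dict.mk todo).get? "due_time").getD ""
  if due = "" then none
  else some ((((PySem.Dict.mk todo).get? "date").getD "",
              ((PySem.Dict.mk todo).get? "title").getD "",
              due,
              ((PySem.Dict.mk todo).get? "notes").getD ""),
             ((PySem.Dict.mk todo).get? "id").getD "")

def bFKey (k : String × String × String × String) : String × String × String := (k.1, k.2.1, k.2.2.1)

def bLoop (cands : List ((String × String × String × String) × String)) (out : List (List (String × String))) (changed : Bool) : List (List (String × String)) → (List (List (String × String))) × Bool
  | [] => (out, changed)
  | event :: rest =>
    if skipEvent event then bLoop cands (out ++ [event]) changed rest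
    else
      let pk : String × String × String × String :=
        (((PySem.Dict.mk event).get? "date").getD "",
         ((PySem.Dict.mk event).get? "title").getD "",
         ((PySem.Dict.mk event).get? "start_time").getD "",
         ((PySem.Dict.mk event).get? "notes").getD "")
      let pm := (cands.filter (fun c => c.1 == pk)).map Prod.snd
      let fm := (cands.filter (fun c => bFKey c.1 == bFKey pk)).map Prod.snd
      let linked := if pm.length = 1 then pm.headD "" else if fm.length = 1 then fm.headD "" else ""
      if linked = "" then bLoop cands (out ++ [event]) changed rest
      else bLoop (cands.filter (fun c => !(c.2 == linked)))
                 (out ++ [((PySem.Dict.mk event).insert "source_todo_id" linked).items]) true rest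

def backfill_event_links_py_alt (todos : List (List (String × String))) (events : List (List (String × String))) : (List (List (String × String))) × Bool :=
  let used0 := initialUsed events
  let cands := (todos.filterMap bCand).filter (fun c => !(PySem.Set.contains used0 c.2))
  bLoop cands [] false events

-- ===== PRECONDITION & SPEC =====
-- Pre_ excludes (a) assoc lists with duplicate keys, which do not represent Python dicts
-- (a Python dict cannot contain them), and (b) inputs on which Python A raises KeyError:
-- a todo with a truthy "due_time" but missing "date"/"title"/"notes"/"id", or a linkable
-- event missing "title"/"notes".
def Pre_backfill_event_links_py (todos : List (List (String × String))) (events : List (List (String × String))) : Prop :=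
  (∀ t ∈ todos, (t.map Prod.fst).Nodup ∧
    (((PySem.Dict.mk t).get? "due_time").getD "" ≠ "" →
      (((PySem.Dict.mk t).get? "date").isSome ∧ ((PySem.Dict.mk t).get? "title").isSome ∧
       ((PySem.Dict.mk t).get? "notes").isSome ∧ ((PySem.Dict.mk t).get? "id").isSome))) ∧
  (∀ e ∈ events, (e.map Prod.fst).Nodup ∧
    (skipEvent e = false →
      (((PySem.Dict.mk e).get? "title").isSome ∧ ((PySem.Dict.mk e).get? "notes").isSome)))
instance (todos : List (List (String × String))) (events : List (List (String × String))) : Decidable (Pre_backfill_event_links_py todos events) := by unfold Pre_backfill_event_links_py; infer_instance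

def pvWitness_backfill_event_links_py : (List (List (String × String))) × (List (List (String × String))) :=
  ([[("id", "1"), ("due_time", "09:00"), ("date", "d"), ("title", "t"), ("notes", "n")]],
   [[("date", "d"), ("title", "t"), ("start_time", "09:00"), ("notes", "n")]])

def Spec_backfill_event_links_py (todos : List (List (String × String))) (events : List (List (String × String))) (out : (List (List (String × String))) × Bool) : Prop := out = backfill_event_links_py_alt todos events
instance (todos : List (List (String × String))) (events : List (List (String × String))) (out : (List (List (String × String))) × Bool) : Decidable (Spec_backfill_event_links_py todos events out) := by unfold Spec_backfill_event_links_py; infer_instance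

-- ===== CLAIM (what is proved, stated in full; the proofs are below) =====
def Claim_equal_backfill_event_links_py : Prop := ∀ (todos : List (List (String × String))) (events : List (List (String × String))), Dom_backfill_event_links_py todos events → Pre_backfill_event_links_py todos events → Spec_backfill_event_links_py todos events (backfill_event_links_py todos events)

-- ===== LEMMAS AND PROOFS =====

theorem getD_modify_list {κ ν : Type} [BEq κ] [LawfulBEq κ] [DecidableEq κ] (d : PySem.Dict κ (List ν)) (k0 k : κ) (g : List ν → List ν) :
    (d.modify k0 [] g).getD k [] = if k = k0 then g (d.getD k0 []) else d.getD k [] := by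
  by_cases h : k = k0
  · subst h; simp [PySem.Dict.getD_modify_self]
  · simp [h, PySem.Dict.getD_modify_of_ne d [] g h]

-- A's precise dict, built by the fold, groups exactly B's flat candidate records by key.
theorem buildP_char (todos : List (List (String × String))) :
    ∀ (p : PySem.Dict (String × String × String × String) (List String)) (f : PySem.Dict (String × String × String) (List String)) (k : String × String × String × String),
    ((todos.foldl aBuildStep (p, f)).1).getD k [] =
      p.getD k [] ++ ((todos.filterMap bCand).filter (fun c => c.1 == k)).map Prod.snd := by
  induction todos with
  | nil => intro p f k; simp
  | cons t ts ih =>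
    intro p f k
    by_cases h : ((PySem.Dict.mk t).get? "due_time").getD "" = ""
    · have hstep : aBuildStep (p, f) t = (p, f) := by simp [aBuildStep, h]
      have hc : bCand t = none := by simp [bCand, h]
      rw [List.foldl_cons, hstep]
      simp only [List.filterMap_cons, hc]
      exact ih p f k
    · have hstep : aBuildStep (p, f) t =
        (p.modify (((PySem.Dict.mk t).get? "date").getD "", ((PySem.Dict.mk t).get? "title").getD "", ((PySem.Dict.mk t).get? "due_time").getD "", ((PySem.Dict.mk t).get? "notes").getD "") [] (fun l => l ++ [((PySem.Dict.mk t).get? "id").getD ""]),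
         f.modify (((PySem.Dict.mk t).get? "date").getD "", ((PySem.Dict.mk t).get? "title").getD "", ((PySem.Dict.mk t).get? "due_time").getD "") [] (fun l => l ++ [((PySem.Dict.mk t).get? "id").getD ""])) := by
        simp [aBuildStep, h]
      have hc : bCand t = some ((((PySem.Dict.mk t).get? "date").getD "", ((PySem.Dict.mk t).get? "title").getD "", ((PySem.Dict.mk t).get? "due_time").getD "", ((PySem.Dict.mk t).get? "notes").getD ""), ((PySem.Dict.mk t).get? "id").getD "") := by
        simp [bCand, h]
      rw [List.foldl_cons, hstep, ih, getD_modify_list]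
      simp only [List.filterMap_cons, hc]
      by_cases hk : k = (((PySem.Dict.mk t).get? "date").getD "", ((PySem.Dict.mk t).get? "title").getD "", ((PySem.Dict.mk t).get? "due_time").getD "", ((PySem.Dict.mk t).get? "notes").getD "")
      · simp [hk, List.append_assoc]
      · have hne : ¬ ((((PySem.Dict.mk t).get? "date").getD "", ((PySem.Dict.mk t).get? "title").getD "", ((PySem.Dict.mk t).get? "due_time").getD "", ((PySem.Dict.mk t).get? "notes").getD "") = k) := fun hh => hk hh.symm
        simp [hk, hne]

-- same for A's fallback dict, keyed by the first three fields.
theorem buildF_char (todos : List (List (String × String))) :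
    ∀ (p : PySem.Dict (String × String × String × String) (List String)) (f : PySem.Dict (String × String × String) (List String)) (k : String × String × String),
    ((todos.foldl aBuildStep (p, f)).2).getD k [] =
      f.getD k [] ++ ((todos.filterMap bCand).filter (fun c => bFKey c.1 == k)).map Prod.snd := by
  induction todos with
  | nil => intro p f k; simp
  | cons t ts ih =>
    intro p f k
    by_cases h : ((PySem.Dict.mk t).get? "due_time").getD "" = ""
    · have hstep : aBuildStep (p, f) t = (p, f) := by simp [aBuildStep, h]
      have hc : bCand t = none := by simp [bCand, h]
      rw [List.foldl_cons, hstep]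
      simp only [List.filterMap_cons, hc]
      exact ih p f k
    · have hstep : aBuildStep (p, f) t =
        (p.modify (((PySem.Dict.mk t).get? "date").getD "", ((PySem.Dict.mk t).get? "title").getD "", ((PySem.Dict.mk t).get? "due_time").getD "", ((PySem.Dict.mk t).get? "notes").getD "") [] (fun l => l ++ [((PySem.Dict.mk t).get? "id").getD ""]),
         f.modify (((PySem.Dict.mk t).get? "date").getD "", ((PySem.Dict.mk t).get? "title").getD "", ((PySem.Dict.mk t).get? "due_time").getD "") [] (fun l => l ++ [((PySem.Dict.mk t).get? "id").getD ""])) := by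
        simp [aBuildStep, h]
      have hc : bCand t = some ((((PySem.Dict.mk t).get? "date").getD "", ((PySem.Dict.mk t).get? "title").getD "", ((PySem.Dict.mk t).get? "due_time").getD "", ((PySem.Dict.mk t).get? "notes").getD ""), ((PySem.Dict.mk t).get? "id").getD "") := by
        simp [bCand, h]
      rw [List.foldl_cons, hstep, ih, getD_modify_list]
      simp only [List.filterMap_cons, hc]
      by_cases hk : k = (((PySem.Dict.mk t).get? "date").getD "", ((PySem.Dict.mk t).get? "title").getD "", ((PySem.Dict.mk t).get? "due_time").getD "")
      · simp [hk, bFKey, List.append_assoc]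
      · have hne : ¬ (bFKey (((PySem.Dict.mk t).get? "date").getD "", ((PySem.Dict.mk t).get? "title").getD "", ((PySem.Dict.mk t).get? "due_time").getD "", ((PySem.Dict.mk t).get? "notes").getD "") = k) := by
          simpa [bFKey] using fun hh => hk hh.symm
        simp [hk, hne]

-- adding one id to the used set = filtering the paired records by that id.
theorem filter_pair_add (l : List ((String × String × String × String) × String)) (s : PySem.Set String) (x : String) :
    l.filter (fun c => !(PySem.Set.contains (PySem.Set.add s x) c.2)) =
      (l.filter (fun c => !(PySem.Set.contains s c.2))).filter (fun c => !(c.2 == x)) := by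
  rw [List.filter_filter]
  apply List.filter_congr
  intro c _
  by_cases hx : c.2 = x <;> by_cases hs : c.2 ∈ s <;> by_cases hc : x ∈ s <;>
    simp [PySem.Set.contains, PySem.Set.add, hx, hs, hc]

-- filtering the mapped ids = mapping the filtered records.
theorem filter_map_snd (l : List ((String × String × String × String) × String)) (q : String → Bool) :
    (l.map Prod.snd).filter q = (l.filter (fun c => q c.2)).map Prod.snd := by
  induction l with
  | nil => rfl
  | cons c cs ih =>
    by_cases h : q c.2 <;> simp [h, ih]

theorem filter_swap {α : Type} (l : List α) (p q : α → Bool) :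
    (l.filter p).filter q = (l.filter q).filter p := by
  rw [List.filter_filter, List.filter_filter]
  exact List.filter_congr (fun a _ => by rw [Bool.and_comm])

-- the event loops agree: A's fold over (used, out, changed) with dict lookups filtered by
-- the used set equals B's recursion over the flat still-unused candidate list.
theorem loop_agree (P : PySem.Dict (String × String × String × String) (List String))
    (F : PySem.Dict (String × String × String) (List String))
    (base : List ((String × String × String × String) × String))
    (hP : ∀ k, P.getD k [] = ((base.filter (fun c => c.1 == k)).map Prod.snd))
    (hF : ∀ k, F.getD k [] = ((base.filter (fun c => bFKey c.1 == k)).map Prod.snd)) :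
    ∀ (evs : List (List (String × String))) (used : PySem.Set String)
      (out : List (List (String × String))) (ch : Bool),
      (evs.foldl (aEventStep P F) (used, out, ch)).2 =
        bLoop (base.filter (fun c => !(PySem.Set.contains used c.2))) out ch evs := by
  intro evs
  induction evs with
  | nil => intro used out ch; rfl
  | cons e es ih =>
    intro used out ch
    rw [List.foldl_cons]
    by_cases hskip : skipEvent e = true
    · simp only [aEventStep, bLoop, hskip, if_pos]
      exact ih used (out ++ [e]) ch
    · have hskip' : skipEvent e = false := by simpa using hskip
      have hpm : ∀ (k : String × String × String × String),
          (P.getD k []).filter (fun i => !(PySem.Set.contains used i)) =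
          ((base.filter (fun c => !(PySem.Set.contains used c.2))).filter (fun c => c.1 == k)).map Prod.snd := by
        intro k
        rw [hP, filter_map_snd, filter_swap]
      have hfm : ∀ (k : String × String × String),
          (F.getD k []).filter (fun i => !(PySem.Set.contains used i)) =
          ((base.filter (fun c => !(PySem.Set.contains used c.2))).filter (fun c => bFKey c.1 == k)).map Prod.snd := by
        intro k
        rw [hF, filter_map_snd, filter_swap]
      simp only [aEventStep, bLoop, hskip', Bool.false_eq_true, if_false]
      rw [hpm, hfm,
        show bFKey (((PySem.Dict.mk e).get? "date").getD "", ((PySem.Dict.mk e).get? "title").getD "", ((PySem.Dict.mk e).get? "start_time").getD "", ((PySem.Dict.mk e).get? "notes").getD "") = (((PySem.Dict.mk e).get? "date").getD "", ((PySem.Dict.mk e).get? "title").getD "", ((PySem.Dict.mk e).get? "start_time").getD "") from rfl]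
      split_ifs <;> first
        | exact ih _ _ _
        | rw [ih, filter_pair_add]

-- ===== VERDICT (by name: the statement is the Claim_ definition above) =====
theorem backfill_event_links_py_spec : Claim_equal_backfill_event_links_py := by
  intro todos events _ _
  unfold Spec_backfill_event_links_py
  simp only [backfill_event_links_py, backfill_event_links_py_alt]
  have hP := fun k => by
    simpa using buildP_char todos PySem.Dict.empty PySem.Dict.empty k
  have hF := fun k => by
    simpa using buildF_char todos PySem.Dict.empty PySem.Dict.empty k
  exact loop_agree _ _ (todos.filterMap bCand) hP hF events (initialUsed events) [] false
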